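-- pv_equiv track=rewrite | github.com/lizanx/CodingPath | Python/ThinkPython_2ed/mine/chapter_9/9-7.py | contain_triple_double
-- ===== SOURCE A (Python) =====
-- def contain_triple_double(s):
--     i = 0
--     while i < len(s):
--         if i + 5 < len(s):
--             if s[i] == s[i + 1] and s[i + 2] == s[i + 3] and s[i + 4] == s[i + 5]:
--                 return True
--             else:
--                 i += 1
--         else:
--             return False
-- ===== SOURCE B (Python) =====
-- def contain_triple_double(s):
--     # Dynamic program: c0/c1 hold the length of the run of adjacent equal
--     # pairs ending at the current even/odd index; 3 chained pairs = success.
--     c0 = c1 = 0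
--     for j in range(1, len(s)):
--         if j % 2 == 0:
--             c0 = c0 + 1 if s[j] == s[j - 1] else 0
--             if c0 >= 3:
--                 return True
--         else:
--             c1 = c1 + 1 if s[j] == s[j - 1] else 0
--             if c1 >= 3:
--                 return True
--     return False
-- ===== Notes on version B (the rewrite author's own statement) =====
-- stated objective: alternative
-- what changed: B replaces A's 6-character window re-scan with a one-pass dynamic program keeping two running pair-chain counters (one per index parity) and succeeding when a chain reaches three pairs; Pre_ excludes only the empty string, on which A's loop never runs and it returns None instead of a bool.
-- outside the precondition, e.g. on contain_triple_double(''): A returns None, B returns False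
import Mathlib
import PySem

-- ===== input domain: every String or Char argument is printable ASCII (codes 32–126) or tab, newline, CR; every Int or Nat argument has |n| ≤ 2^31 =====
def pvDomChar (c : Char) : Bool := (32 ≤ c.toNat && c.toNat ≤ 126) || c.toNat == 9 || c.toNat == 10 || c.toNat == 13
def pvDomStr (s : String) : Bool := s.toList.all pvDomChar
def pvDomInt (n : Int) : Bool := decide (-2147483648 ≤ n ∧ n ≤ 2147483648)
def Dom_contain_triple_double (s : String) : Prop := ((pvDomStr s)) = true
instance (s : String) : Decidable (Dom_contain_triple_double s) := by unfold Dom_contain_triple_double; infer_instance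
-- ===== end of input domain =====

-- B is a one-pass DP with two pair-chain counters (one per parity) instead of A's 6-char window scan; return-value equivalence proved for nonempty strings.


-- ===== PORT A =====
-- the while loop: i increments until it returns; outside Pre_ (s = "") the loop body never runs (Python falls off and returns None)
def containLoopA (cs : List Char) (i : Nat) : Bool :=
  if i < cs.length then
    if i + 5 < cs.length then
      if (cs[i]? == cs[i+1]?) && (cs[i+2]? == cs[i+3]?) && (cs[i+4]? == cs[i+5]?) then
        true
      else
        containLoopA cs (i + 1)
    else false
  else false
termination_by cs.length - i
decreasing_by omega

def contain_triple_double (s : String) : Bool := containLoopA s.toList 0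

-- ===== PORT B =====
-- Source B's for-loop over j in range(1, len(s)) with the two chain counters c0, c1
def loopB (cs : List Char) (c0 c1 : Nat) (j : Nat) : Bool :=
  if j < cs.length then
    if j % 2 == 0 then
      let c0' := if cs[j]? == cs[j-1]? then c0 + 1 else 0
      if 3 ≤ c0' then true else loopB cs c0' c1 (j+1)
    else
      let c1' := if cs[j]? == cs[j-1]? then c1 + 1 else 0
      if 3 ≤ c1' then true else loopB cs c0 c1' (j+1)
  else false
termination_by cs.length - j
decreasing_by all_goals omega

def contain_triple_double_alt (s : String) : Bool := loopB s.toList 0 0 1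

-- ===== PRECONDITION & SPEC =====
-- Pre_ excludes only the empty string, on which Python A's while loop never runs and A returns None, not a bool.
def Pre_contain_triple_double (s : String) : Prop := s ≠ ""
instance (s : String) : Decidable (Pre_contain_triple_double s) := by unfold Pre_contain_triple_double; infer_instance
def pvWitness_contain_triple_double : String := "aabbcc"

def Spec_contain_triple_double (s : String) (out : Bool) : Prop := out = contain_triple_double_alt s
instance (s : String) (out : Bool) : Decidable (Spec_contain_triple_double s out) := by unfold Spec_contain_triple_double; infer_instance

-- ===== CLAIM (what is proved, stated in full; the proofs are below) =====
def Claim_equal_contain_triple_double : Prop := ∀ (s : String), Dom_contain_triple_double s → Pre_contain_triple_double s → Spec_contain_triple_double s (contain_triple_double s)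

-- ===== LEMMAS AND PROOFS =====

-- the three-pair window predicate A tests at position i
def pvP (cs : List Char) (j : Nat) : Bool :=
  (cs[j]? == cs[j+1]?) && (cs[j+2]? == cs[j+3]?) && (cs[j+4]? == cs[j+5]?)

theorem containLoopA_any (cs : List Char) (i : Nat) (hi : i < cs.length) :
    containLoopA cs i = (List.range' i (cs.length - 5 - i)).any (pvP cs) := by
  induction hn : cs.length - i using Nat.strong_induction_on generalizing i with
  | _ n ih =>
    subst hn
    rw [containLoopA]
    by_cases h5 : i + 5 < cs.length
    · have hlen : cs.length - 5 - i = (cs.length - 5 - (i+1)) + 1 := by omega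
      rw [hlen, List.range'_succ, List.any_cons]
      simp only [hi, if_pos, h5]
      rw [ih (cs.length - (i+1)) (by omega) (i+1) (by omega) rfl]
      cases hb : ((cs[i]? == cs[i+1]?) && (cs[i+2]? == cs[i+3]?) && (cs[i+4]? == cs[i+5]?)) <;>
        simp [pvP, hb]
    · have h0 : cs.length - 5 - i = 0 := by omega
      simp [hi, h5, h0]

-- length of the chain of adjacent equal pairs ending with the pair (j-1, j)
def pvChain (cs : List Char) (j : Nat) : Nat :=
  if j = 0 then 0
  else if cs[j]? == cs[j-1]? then pvChain cs (j - 2) + 1 else 0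
termination_by j
decreasing_by omega

theorem loopB_any (cs : List Char) (j c0 c1 : Nat) (hj : 1 ≤ j)
    (h1 : (if j % 2 = 0 then c0 else c1) = pvChain cs (j - 2))
    (h2 : (if j % 2 = 0 then c1 else c0) = pvChain cs (j - 1)) :
    loopB cs c0 c1 j = (List.range' j (cs.length - j)).any (fun k => decide (3 ≤ pvChain cs k)) := by
  induction hn : cs.length - j using Nat.strong_induction_on generalizing j c0 c1 with
  | _ n ih =>
    subst hn
    rw [loopB]
    by_cases hlt : j < cs.length
    · have hlen : cs.length - j = (cs.length - (j+1)) + 1 := by omega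
      rw [hlen, List.range'_succ, List.any_cons, if_pos hlt]
      have hj0 : ¬ j = 0 := by omega
      have hchain : pvChain cs j = (if cs[j]? == cs[j-1]? then pvChain cs (j-2) + 1 else 0) := by
        rw [pvChain]; simp [hj0]
      by_cases hp : j % 2 = 0
      · rw [if_pos hp] at h1 h2
        rw [if_pos (show (j % 2 == 0) = true by simp [hp])]
        have hc : (if cs[j]? == cs[j-1]? then c0 + 1 else 0) = pvChain cs j := by
          rw [hchain, h1]
        simp only [hc]
        by_cases h3 : 3 ≤ pvChain cs j
        · simp [h3]
        · rw [if_neg h3]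
          rw [ih (cs.length - (j+1)) (by omega) (j+1) (pvChain cs j) c1 (by omega)
              (by rw [if_neg (show ¬ (j+1) % 2 = 0 by omega),
                      show j + 1 - 2 = j - 1 from by omega]
                  exact h2)
              (by rw [if_neg (show ¬ (j+1) % 2 = 0 by omega),
                      show j + 1 - 1 = j from by omega]) rfl]
          simp [h3]
      · rw [if_neg hp] at h1 h2
        rw [if_neg (show ¬ (j % 2 == 0) = true by simp [hp])]
        have hc : (if cs[j]? == cs[j-1]? then c1 + 1 else 0) = pvChain cs j := by
          rw [hchain, h1]
        simp only [hc]
        by_cases h3 : 3 ≤ pvChain cs j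
        · simp [h3]
        · rw [if_neg h3]
          rw [ih (cs.length - (j+1)) (by omega) (j+1) c0 (pvChain cs j) (by omega)
              (by rw [if_pos (show (j+1) % 2 = 0 by omega),
                      show j + 1 - 2 = j - 1 from by omega]
                  exact h2)
              (by rw [if_pos (show (j+1) % 2 = 0 by omega),
                      show j + 1 - 1 = j from by omega]) rfl]
          simp [h3]
    · have h0 : cs.length - j = 0 := by omega
      simp [hlt, h0]

-- a chain is at most one pair per two characters
theorem pvChain_le (cs : List Char) (k : Nat) : pvChain cs k ≤ (k + 1) / 2 := by
  induction k using Nat.strong_induction_on with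
  | _ k ih =>
    rw [pvChain]
    by_cases hk : k = 0
    · simp [hk]
    · simp only [hk, if_false]
      split
      · have := ih (k - 2) (by omega)
        omega
      · omega

-- a chain of length ≥ 3 ending at m + 5 is exactly A's window at m
theorem chain_five (cs : List Char) (m : Nat) :
    3 ≤ pvChain cs (m + 5) ↔ pvP cs m = true := by
  rw [pvChain]
  simp only [show ¬ m + 5 = 0 by omega, if_false,
    show m + 5 - 1 = m + 4 from by omega, show m + 5 - 2 = m + 3 from by omega]
  rw [pvChain]
  simp only [show ¬ m + 3 = 0 by omega, if_false,
    show m + 3 - 1 = m + 2 from by omega, show m + 3 - 2 = m + 1 from by omega]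
  rw [pvChain]
  simp only [show ¬ m + 1 = 0 by omega, if_false,
    show m + 1 - 1 = m from by omega]
  simp only [pvP, Bool.and_eq_true, beq_iff_eq]
  constructor
  · intro h
    split_ifs at h with q3 q2 q1
    · exact ⟨⟨q1.symm, q2.symm⟩, q3.symm⟩
    · omega
    · omega
    · omega
  · rintro ⟨⟨p1, p2⟩, p3⟩
    rw [if_pos p3.symm, if_pos p2.symm, if_pos p1.symm]
    omega

theorem chain_ge3_iff (cs : List Char) (k : Nat) :
    3 ≤ pvChain cs k ↔ 5 ≤ k ∧ pvP cs (k - 5) = true := by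
  constructor
  · intro h
    have hle := pvChain_le cs k
    have hk5 : 5 ≤ k := by omega
    have hk : k = (k - 5) + 5 := by omega
    rw [hk] at h
    exact ⟨hk5, (chain_five cs (k - 5)).mp h⟩
  · rintro ⟨hk5, hp⟩
    have hk : k = (k - 5) + 5 := by omega
    rw [hk]
    exact (chain_five cs (k - 5)).mpr hp

-- ===== VERDICT (by name: the statement is the Claim_ definition above) =====
theorem contain_triple_double_spec : Claim_equal_contain_triple_double := by
  intro s _ hpre
  unfold Spec_contain_triple_double contain_triple_double contain_triple_double_alt
  have hne : s.toList ≠ [] := by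
    intro h
    exact hpre (String.toList_eq_nil_iff.mp h)
  set cs := s.toList with hcs
  have hlen : 0 < cs.length := List.length_pos_iff.mpr hne
  rw [containLoopA_any cs 0 hlen]
  rw [loopB_any cs 1 0 0 (le_refl 1) (by simp [pvChain]) (by simp [pvChain])]
  rw [Bool.eq_iff_iff, List.any_eq_true, List.any_eq_true]
  constructor
  · rintro ⟨i, hi, hp⟩
    rw [List.mem_range'_1] at hi
    have hi2 : i < cs.length - 5 := by
      have := hi.2
      omega
    refine ⟨i + 5, ?_, ?_⟩
    · rw [List.mem_range'_1]
      constructor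
      · omega
      · omega
    · rw [decide_eq_true_iff, chain_ge3_iff]
      have hi5 : i + 5 - 5 = i := by omega
      rw [hi5]
      exact ⟨by omega, hp⟩
  · rintro ⟨k, hk, hc⟩
    rw [List.mem_range'_1] at hk
    rw [decide_eq_true_iff, chain_ge3_iff] at hc
    obtain ⟨hk5, hp⟩ := hc
    refine ⟨k - 5, ?_, hp⟩
    rw [List.mem_range'_1]
    have hk2 : k < cs.length := by
      have := hk.2
      omega
    constructor
    · omega
    · omega
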